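-- pv_equiv track=rewrite | github.com/Strange-animalss/EGM | erpgen/prompts.py | _truncate_extra_props
-- ===== SOURCE A (Python) =====
-- def _truncate_extra_props(props: str, budget: int) -> str:
--     """Trim a comma-separated list to fit ``budget`` chars, never cutting in
--     the middle of an item."""
--     if len(props) <= budget:
--         return props
--     items = [p.strip() for p in props.split(",") if p.strip()]
--     out: list[str] = []
--     used = 0
--     for it in items:
--         cost = len(it) + 2  # ", "
--         if used + cost > budget:
--             break
--         out.append(it)
--         used += cost
--     return ", ".join(out)
-- ===== SOURCE B (Python) =====
-- def _truncate_extra_props(props: str, budget: int) -> str: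
--     if len(props) <= budget:
--         return props
--     items = [p.strip() for p in props.split(",") if p.strip()]
--     # prefix-cost table: acc[i] = total cost of keeping items[0..i]
--     acc = []
--     total = 0
--     for it in items:
--         total += len(it) + 2
--         acc.append(total)
--     # binary search for the largest k with acc[k-1] <= budget
--     lo, hi = 0, len(acc)
--     while lo < hi:
--         mid = (lo + hi) // 2
--         if acc[mid] <= budget:
--             lo = mid + 1
--         else:
--             hi = mid
--     return ", ".join(items[:lo])
-- ===== Notes on version B (the rewrite author's own statement) =====
-- stated objective: alternative
-- what changed: Replaces the greedy scan-and-break loop with a prefix-cost table built in one pass plus a binary search for the largest prefix whose cumulative cost fits the budget.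
import Mathlib
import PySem

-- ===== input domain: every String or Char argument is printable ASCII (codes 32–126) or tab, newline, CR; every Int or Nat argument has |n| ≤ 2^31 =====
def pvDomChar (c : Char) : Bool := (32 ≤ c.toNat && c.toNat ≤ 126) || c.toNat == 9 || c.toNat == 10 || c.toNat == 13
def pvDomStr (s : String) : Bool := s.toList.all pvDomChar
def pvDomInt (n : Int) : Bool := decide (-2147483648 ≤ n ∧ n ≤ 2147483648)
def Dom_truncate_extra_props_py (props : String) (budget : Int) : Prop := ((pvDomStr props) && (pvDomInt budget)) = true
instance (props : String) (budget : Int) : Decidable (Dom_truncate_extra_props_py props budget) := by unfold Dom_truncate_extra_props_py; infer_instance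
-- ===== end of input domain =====

-- B replaces A's greedy scan-and-break with a prefix-cost table plus a binary search for the cutoff (alternative decomposition, same result).

-- ===== PORT A =====
-- the for-loop with break: keep items while cumulative cost stays within budget
def pvLoopA (budget : Int) : List String → Int → List String
  | [], _ => []
  | it :: rest, used =>
    let cost := PySem.Str.len it + 2
    if used + cost > budget then []
    else it :: pvLoopA budget rest (used + cost)

def truncate_extra_props_py (props : String) (budget : Int) : String :=
  if PySem.Str.len props ≤ budget then props
  else
    let items := ((PySem.Str.split? props ",").getD []).filterMap
      (fun p => let s := PySem.Str.strip p; if s = "" then none else some s)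
    PySem.Str.join ", " (pvLoopA budget items 0)

-- ===== PORT B =====
-- Source B's for-loop building the prefix-cost table acc (state: (acc, total))
def pvBuildAcc : List String → List Int × Int → List Int × Int
  | [], st => st
  | it :: rest, st =>
    let t := st.2 + (PySem.Str.len it + 2)
    pvBuildAcc rest (st.1 ++ [t], t)

-- the while-loop binary search of Source B (fuel = hi - lo, the loop's own measure; fuel only makes the recursion structural)
def pvBsearchAux (acc : List Int) (budget : Int) : Nat → Nat → Nat → Nat
  | 0, lo, _ => lo
  | fuel + 1, lo, hi =>
    if lo < hi then
      let mid := (lo + hi) / 2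
      if PySem.List.pyGetD acc (mid : Int) 0 ≤ budget then pvBsearchAux acc budget fuel (mid + 1) hi
      else pvBsearchAux acc budget fuel lo mid
    else lo

def pvBsearch (acc : List Int) (budget : Int) (lo hi : Nat) : Nat :=
  pvBsearchAux acc budget (hi - lo) lo hi

def truncate_extra_props_py_alt (props : String) (budget : Int) : String :=
  if PySem.Str.len props ≤ budget then props
  else
    let items := ((PySem.Str.split? props ",").getD []).filterMap
      (fun p => let s := PySem.Str.strip p; if s = "" then none else some s)
    let st := pvBuildAcc items ([], 0)
    let k := pvBsearch st.1 budget 0 st.1.length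
    PySem.Str.join ", " (items.take k)

-- ===== PRECONDITION & SPEC =====
def Spec_truncate_extra_props_py (props : String) (budget : Int) (out : String) : Prop := out = truncate_extra_props_py_alt props budget
instance (props : String) (budget : Int) (out : String) : Decidable (Spec_truncate_extra_props_py props budget out) := by unfold Spec_truncate_extra_props_py; infer_instance

-- ===== CLAIM (what is proved, stated in full; the proofs are below) =====
def Claim_equal_truncate_extra_props_py : Prop := ∀ (props : String) (budget : Int), Dom_truncate_extra_props_py props budget → Spec_truncate_extra_props_py props budget (truncate_extra_props_py props budget)

-- ===== LEMMAS AND PROOFS =====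

-- prefix-cost list: cum t items lists the running totals t + cost(items[0..i])
def pvCum (t : Int) : List String → List Int
  | [] => []
  | it :: rest => (t + (PySem.Str.len it + 2)) :: pvCum (t + (PySem.Str.len it + 2)) rest

theorem pv_getLast?_getD (y : Int) (ys : List Int) (a b : Int) :
    (y :: ys).getLast?.getD a = (y :: ys).getLast?.getD b := by
  induction ys generalizing y with
  | nil => rfl
  | cons z zs ih => simpa [List.getLast?_cons_cons] using ih z

-- Source B's table-building loop produces exactly the prefix-cost list
theorem pvBuildAcc_eq (items : List String) (a : List Int) (t : Int) :
    pvBuildAcc items (a, t) = (a ++ pvCum t items, (pvCum t items).getLast?.getD t) := by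
  induction items generalizing a t with
  | nil => simp [pvBuildAcc, pvCum]
  | cons it rest ih =>
      simp only [pvBuildAcc, pvCum]
      rw [ih]
      cases hc : pvCum (t + (PySem.Str.len it + 2)) rest with
      | nil => simp
      | cons y ys =>
          simp [List.getLast?_cons_cons]
          exact pv_getLast?_getD y ys _ _

theorem pvCum_lt (items : List String) (t : Int) : ∀ x ∈ pvCum t items, t < x := by
  induction items generalizing t with
  | nil => simp [pvCum]
  | cons it rest ih =>
      intro x hx
      simp only [pvCum, List.mem_cons] at hx
      have hlen : 0 ≤ PySem.Str.len it := by
        simp [PySem.Str.len]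
      rcases hx with h | h
      · omega
      · have := ih (t + (PySem.Str.len it + 2)) x h; omega

theorem pvCum_pairwise (items : List String) (t : Int) : (pvCum t items).Pairwise (· < ·) := by
  induction items generalizing t with
  | nil => exact List.Pairwise.nil
  | cons it rest ih =>
      refine List.pairwise_cons.mpr ⟨?_, ih _⟩
      intro x hx
      exact pvCum_lt rest _ x hx

-- A's loop keeps exactly the prefix whose running totals stay ≤ budget
theorem loopA_eq_take (budget : Int) (items : List String) (t : Int) :
    pvLoopA budget items t = items.take ((pvCum t items).takeWhile (fun x => decide (x ≤ budget))).length := by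
  induction items generalizing t with
  | nil => rfl
  | cons it rest ih =>
      by_cases h : t + ((it.length : Int) + 2) ≤ budget
      · have h' : ¬ budget < t + ((it.length : Int) + 2) := by omega
        simp [pvLoopA, pvCum, PySem.Str.len, h, h', ih]
      · have h' : budget < t + ((it.length : Int) + 2) := by omega
        simp [pvLoopA, pvCum, PySem.Str.len, h, h']

-- index characterisation of the takeWhile cutoff on a strictly sorted list
theorem sorted_takeWhile_iff (acc : List Int) (b : Int) (hs : acc.Pairwise (· < ·))
    (i : Nat) (hi : i < acc.length) :
    acc[i] ≤ b ↔ i < (acc.takeWhile (fun x => decide (x ≤ b))).length := by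
  induction acc generalizing i with
  | nil => simp at hi
  | cons x rest ih =>
      rcases List.pairwise_cons.mp hs with ⟨hx, hrest⟩
      cases i with
      | zero =>
          simp only [List.getElem_cons_zero, List.takeWhile_cons]
          by_cases hxb : x ≤ b
          · simp [hxb]
          · simp [hxb]
      | succ j =>
          have hjlen : j < rest.length := by simpa using hi
          simp only [List.getElem_cons_succ, List.takeWhile_cons]
          by_cases hxb : x ≤ b
          · simpa [hxb, Nat.succ_lt_succ_iff] using ih hrest j hjlen
          · -- x > b, and rest elements are > x > b
            have hgt := hx (rest[j]'hjlen) (List.getElem_mem _)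
            have hj : ¬ (rest[j]'hjlen ≤ b) := by omega
            simp [hxb, hj]

theorem pv_len_takeWhile_le {p : Int → Bool} (l : List Int) : (l.takeWhile p).length ≤ l.length := by
  induction l with
  | nil => simp
  | cons x xs ih => simp only [List.takeWhile_cons]; split <;> simp <;> omega

-- binary-search correctness on a strictly sorted list
theorem pvBsearchAux_correct (acc : List Int) (b : Int) (hs : acc.Pairwise (· < ·)) :
    ∀ (n lo hi : Nat), hi - lo ≤ n →
      lo ≤ (acc.takeWhile (fun x => decide (x ≤ b))).length →
      (acc.takeWhile (fun x => decide (x ≤ b))).length ≤ hi →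
      hi ≤ acc.length →
      pvBsearchAux acc b n lo hi = (acc.takeWhile (fun x => decide (x ≤ b))).length := by
  intro n
  induction n with
  | zero =>
      intro lo hi h1 h2 h3 _
      simp only [pvBsearchAux]
      omega
  | succ m ih =>
      intro lo hi h1 h2 h3 h4
      simp only [pvBsearchAux]
      by_cases hlt : lo < hi
      · simp only [hlt, if_pos]
        set k := (acc.takeWhile (fun x => decide (x ≤ b))).length with hk
        have hmidlt : (lo + hi) / 2 < acc.length := by omega
        have hget : PySem.List.pyGetD acc (((lo + hi) / 2 : Nat) : Int) 0 = acc[(lo + hi) / 2] := by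
          rw [PySem.List.pyGetD_natCast]; exact List.getD_eq_getElem acc 0 hmidlt
        rw [hget]
        have hiff := sorted_takeWhile_iff acc b hs ((lo + hi) / 2) hmidlt
        by_cases hle : acc[(lo + hi) / 2] ≤ b
        · have hk' : (lo + hi) / 2 < k := hiff.mp hle
          simp only [hle, if_pos]
          exact ih ((lo + hi) / 2 + 1) hi (by omega) (by omega) h3 h4
        · have hk' : ¬ ((lo + hi) / 2 < k) := fun h => hle (hiff.mpr h)
          simp only [hle, if_false]
          exact ih lo ((lo + hi) / 2) (by omega) h2 (by omega) (by omega)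
      · simp only [hlt, if_false]
        omega

theorem pvBsearch_correct (acc : List Int) (b : Int) (hs : acc.Pairwise (· < ·))
    (lo hi : Nat)
    (h2 : lo ≤ (acc.takeWhile (fun x => decide (x ≤ b))).length)
    (h3 : (acc.takeWhile (fun x => decide (x ≤ b))).length ≤ hi)
    (h4 : hi ≤ acc.length) :
    pvBsearch acc b lo hi = (acc.takeWhile (fun x => decide (x ≤ b))).length := by
  unfold pvBsearch
  exact pvBsearchAux_correct acc b hs (hi - lo) lo hi (le_refl _) h2 h3 h4

-- ===== VERDICT (by name: the statement is the Claim_ definition above) =====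
theorem truncate_extra_props_py_spec : Claim_equal_truncate_extra_props_py := by
  intro props budget _
  unfold Spec_truncate_extra_props_py truncate_extra_props_py truncate_extra_props_py_alt
  by_cases h : PySem.Str.len props ≤ budget
  · rw [if_pos h, if_pos h]
  · rw [if_neg h, if_neg h]
    simp only [pvBuildAcc_eq, List.nil_append]
    set items := ((PySem.Str.split? props ",").getD []).filterMap
      (fun p => let s := PySem.Str.strip p; if s = "" then none else some s) with hitems
    rw [pvBsearch_correct (pvCum 0 items) budget (pvCum_pairwise items 0)
          0 (pvCum 0 items).length (Nat.zero_le _)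
          (pv_len_takeWhile_le _) (le_refl _)]
    rw [loopA_eq_take]
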